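-- pv_equiv track=rewrite | github.com/jayblitz/Nadobro_bot | src/nadobro/handlers/formatters.py | _escape_and_convert_inline
-- ===== SOURCE A (Python) =====
-- _TG_SPECIAL = set(r'_[]()~`>#+-=|{}.!')
--
-- def _escape_tg(s: str) -> str:
--     """Escape for MarkdownV2 but leave already-escaped chars alone."""
--     out: list[str] = []
--     i = 0
--     while i < len(s):
--         ch = s[i]
--         if ch == '\\' and i + 1 < len(s):
--             # already escaped – pass through
--             out.append(ch)
--             out.append(s[i + 1])
--             i += 2
--             continue
--         if ch in _TG_SPECIAL:
--             out.append('\\')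
--         out.append(ch)
--         i += 1
--     return "".join(out)
--
-- def _escape_and_convert_inline(raw: str) -> str:
--     """Process inline markdown on a RAW (unescaped) string.
--
--     Finds **bold** and `code` spans first, escapes everything else.
--     This avoids the problem of escaping destroying markdown markers.
--     """
--     result: list[str] = []
--     i = 0
--     while i < len(raw):
--         # Bold: **...**
--         if raw[i:i+2] == '**':
--             end = raw.find('**', i + 2)
--             if end != -1:
--                 inner = _escape_tg(raw[i+2:end])
--                 result.append(f'*{inner}*')
--                 i = end + 2
--                 continue
--         # Inline code: `...`
--         if raw[i] == '`':
--             end = raw.find('`', i + 1)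
--             if end != -1:
--                 inner = raw[i+1:end]  # code content not escaped in TG
--                 result.append(f'`{inner}`')
--                 i = end + 1
--                 continue
--         # Regular character — escape if special
--         ch = raw[i]
--         if ch == '\\' and i + 1 < len(raw):
--             result.append(ch)
--             result.append(raw[i + 1])
--             i += 2
--             continue
--         if ch in _TG_SPECIAL:
--             result.append('\\')
--         result.append(ch)
--         i += 1
--     return "".join(result)
-- ===== SOURCE B (Python) =====
-- import re
--
-- _TG_SPECIAL = set(r'_[]()~`>#+-=|{}.!')
--
-- # One ordered alternation drives the whole tokenization: bold span, code span,
-- # escaped pair, single char — matched in precedence order by the regex engine.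
-- _TOKEN = re.compile(r'\*\*(.*?)\*\*|`([^`]*)`|\\.|.', re.DOTALL)
-- _ESC = re.compile(r'\\.|.', re.DOTALL)
--
--
-- def _escape_tg(s: str) -> str:
--     out = []
--     for m in _ESC.finditer(s):
--         t = m.group(0)
--         if len(t) == 2:
--             out.append(t)
--         else:
--             out.append('\\' + t if t in _TG_SPECIAL else t)
--     return ''.join(out)
--
--
-- def _escape_and_convert_inline(raw: str) -> str:
--     parts = []
--     for m in _TOKEN.finditer(raw):
--         t = m.group(0)
--         if m.group(1) is not None:
--             parts.append('*' + _escape_tg(m.group(1)) + '*')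
--         elif m.group(2) is not None:
--             parts.append('`' + m.group(2) + '`')
--         elif len(t) == 2:
--             parts.append(t)
--         else:
--             parts.append('\\' + t if t in _TG_SPECIAL else t)
--     return ''.join(parts)
-- ===== Notes on version B (the rewrite author's own statement) =====
-- stated objective: idiomatic
-- what changed: B replaces A's manual index loop with raw[i:i+2] slicing and str.find scans by a single ordered regex alternation (bold span | code span | escaped pair | any char) iterated with re.finditer, and escapes via the same engine-driven tokenization.
import Mathlib
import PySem

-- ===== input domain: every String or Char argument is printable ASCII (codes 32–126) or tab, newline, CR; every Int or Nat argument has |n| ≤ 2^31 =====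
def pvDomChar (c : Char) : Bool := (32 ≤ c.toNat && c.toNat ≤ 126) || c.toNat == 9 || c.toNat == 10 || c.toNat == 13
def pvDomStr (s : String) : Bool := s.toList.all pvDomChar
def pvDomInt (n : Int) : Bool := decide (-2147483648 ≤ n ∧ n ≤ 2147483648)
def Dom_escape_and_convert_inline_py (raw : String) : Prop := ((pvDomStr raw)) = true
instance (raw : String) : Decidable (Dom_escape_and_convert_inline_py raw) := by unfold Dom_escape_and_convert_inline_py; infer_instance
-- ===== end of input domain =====

-- B re-implements A's manual index/find scan as an ordered-alternation tokenizer
-- (regex  \*\*(.*?)\*\*|`([^`]*)`|\\.|.  in Source B, hand-ported step for step since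
-- Lean has no regex engine): same return value, different decomposition (objective: idiomatic).

-- ===== PORT A =====
-- _TG_SPECIAL = set(r'_[]()~`>#+-=|{}.!')  (membership-only set of distinct chars)
def pvTgSpecial : List Char := "_[]()~`>#+-=|{}.!".toList

-- _escape_tg: while-loop over index i; emits chars in order
def escTgA (s : List Char) (i : Nat) : List Char :=
  if h : i < s.length then
    if hp : s[i] = '\\' ∧ i + 1 < s.length then
      s[i] :: s[i+1]'hp.2 :: escTgA s (i+2)
    else
      (if pvTgSpecial.contains s[i] then ['\\'] else []) ++ s[i] :: escTgA s (i+1)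
  else []
termination_by s.length - i

-- the while-loop of _escape_and_convert_inline: `fuel` only totalizes the loop
-- (i strictly increases each iteration, so fuel = raw.length suffices; proved in the lemmas)
def pvGoA (raw : List Char) : Nat → Nat → List (List Char)
  | 0, _ => []
  | fuel+1, i =>
    if h : i < raw.length then
      -- Bold: raw[i:i+2] == '**' and raw.find('**', i+2) != -1
      if hb : PySem.List.slice raw (some (i:Int)) (some ((i:Int)+2)) = ['*','*'] ∧
              PySem.Chars.findFrom raw ['*','*'] ((i:Int)+2) ≠ -1 then
        ('*' :: escTgA (PySem.List.slice raw (some ((i:Int)+2))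
                          (some (PySem.Chars.findFrom raw ['*','*'] ((i:Int)+2)))) 0 ++ ['*'])
          :: pvGoA raw fuel ((PySem.Chars.findFrom raw ['*','*'] ((i:Int)+2)) + 2).toNat
      -- Inline code: raw[i] == '`' and raw.find('`', i+1) != -1
      else if hc : raw[i] = '`' ∧ PySem.Chars.findFrom raw ['`'] ((i:Int)+1) ≠ -1 then
        ('`' :: PySem.List.slice raw (some ((i:Int)+1))
                  (some (PySem.Chars.findFrom raw ['`'] ((i:Int)+1))) ++ ['`'])
          :: pvGoA raw fuel ((PySem.Chars.findFrom raw ['`'] ((i:Int)+1)) + 1).toNat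
      -- already-escaped pair
      else if hbs : raw[i] = '\\' ∧ i + 1 < raw.length then
        [raw[i]] :: [raw[i+1]'hbs.2] :: pvGoA raw fuel (i+2)
      -- regular character
      else
        (if pvTgSpecial.contains raw[i] then [['\\']] else []) ++ [raw[i]] :: pvGoA raw fuel (i+1)
    else []

-- "".join(result)
def escape_and_convert_inline_py (raw : String) : String :=
  String.ofList ((pvGoA raw.toList raw.toList.length 0).flatten)

-- ===== PORT B =====
def pvTgSpecialB : List Char := "_[]()~`>#+-=|{}.!".toList

-- split at the first '**': some (before, after) | none.  (what the lazy regex body `(.*?)` does)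
def pvSplitStars : List Char → Option (List Char × List Char)
  | [] => none
  | [_] => none
  | a :: b :: t =>
    if a = '*' ∧ b = '*' then some ([], t)
    else (pvSplitStars (b :: t)).map (fun pr => (a :: pr.1, pr.2))

-- split at the first '`'  (what `[^`]*` followed by a backtick does)
def pvSplitTick : List Char → Option (List Char × List Char)
  | [] => none
  | c :: t => if c = '`' then some ([], t) else (pvSplitTick t).map (fun pr => (c :: pr.1, pr.2))

-- structure lemmas (the ports' termination cites them, so they live above the claim block)
theorem pvSplitStars_some_eq : ∀ (t p r : List Char), pvSplitStars t = some (p, r) →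
    t = p ++ '*' :: '*' :: r := by
  intro t
  induction t with
  | nil => intro p r h; simp [pvSplitStars] at h
  | cons a t ih =>
    intro p r h
    match t with
    | [] => simp [pvSplitStars] at h
    | b :: t' =>
      rw [pvSplitStars] at h
      split at h
      · rename_i hab
        obtain ⟨rfl, rfl⟩ := by simpa using h
        simp [hab.1, hab.2]
      · simp only [Option.map_eq_some_iff] at h
        obtain ⟨⟨p', r'⟩, hp', heq⟩ := h
        obtain ⟨rfl, rfl⟩ := by simpa using heq.symm
        simp [ih p' r hp']

theorem pvSplitTick_some_eq : ∀ (t p r : List Char), pvSplitTick t = some (p, r) →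
    t = p ++ '`' :: r := by
  intro t
  induction t with
  | nil => intro p r h; simp [pvSplitTick] at h
  | cons c t ih =>
    intro p r h
    rw [pvSplitTick] at h
    split at h
    · rename_i hc
      obtain ⟨rfl, rfl⟩ := by simpa using h
      simp [hc]
    · simp only [Option.map_eq_some_iff] at h
      obtain ⟨⟨p', r'⟩, hp', heq⟩ := h
      obtain ⟨rfl, rfl⟩ := by simpa using heq.symm
      simp [ih p' r hp']

-- _escape_tg in B: tokens of the alternation  \\.|.
def escTgB : List Char → List Char
  | [] => []
  | c :: d :: t' =>
    if c = '\\' then '\\' :: d :: escTgB t'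
    else (if pvTgSpecialB.contains c then ['\\', c] else [c]) ++ escTgB (d :: t')
  | [c] => if pvTgSpecialB.contains c then ['\\', c] else [c]

-- emit for the catch-all alternative '.'
def pvPlain (c : Char) (t : List Char) : List Char × List Char :=
  ((if pvTgSpecialB.contains c then ['\\', c] else [c]), t)

-- one token of the alternation  \*\*(.*?)\*\* | `([^`]*)` | \\. | .  at head position:
-- (emitted output, remaining input)
def pvTok (c : Char) (t : List Char) : List Char × List Char :=
  if c = '*' ∧ t.head? = some '*' then
    match pvSplitStars t.tail with
    | some (p, r) => ('*' :: escTgB p ++ ['*'], r)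
    | none => pvPlain c t
  else if c = '`' then
    match pvSplitTick t with
    | some (p, r) => ('`' :: p ++ ['`'], r)
    | none => pvPlain c t
  else if c = '\\' then
    match t with
    | d :: t' => (['\\', d], t')
    | [] => pvPlain c t
  else pvPlain c t

theorem pvTok_rest_le (c : Char) (t : List Char) : (pvTok c t).2.length ≤ t.length := by
  unfold pvTok
  split
  · rcases hsp : pvSplitStars t.tail with _ | ⟨p, r⟩
    · simp [pvPlain]
    · have h1 := pvSplitStars_some_eq _ _ _ hsp
      have ht : t.tail.length ≤ t.length := by cases t <;> simp
      have h2 : t.tail.length = p.length + (r.length + 2) := by simp [h1]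
      simp; omega
  · split
    · rcases hsp : pvSplitTick t with _ | ⟨p, r⟩
      · simp [pvPlain]
      · have h1 := pvSplitTick_some_eq _ _ _ hsp
        have h2 : t.length = p.length + (r.length + 1) := by simp [h1]
        simp; omega
    · split
      · match t with
        | [] => simp [pvPlain]
        | d :: t' => simp
      · simp [pvPlain]

-- finditer over the alternation: each match consumes ≥ 1 char
def pvGoB : List Char → List Char
  | [] => []
  | c :: t => (pvTok c t).1 ++ pvGoB (pvTok c t).2
termination_by l => l.length
decreasing_by
  have := pvTok_rest_le c t
  simp; omega

def escape_and_convert_inline_py_alt (raw : String) : String :=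
  String.ofList (pvGoB raw.toList)

-- ===== PRECONDITION & SPEC =====
def Spec_escape_and_convert_inline_py (raw : String) (out : String) : Prop := out = escape_and_convert_inline_py_alt raw
instance (raw : String) (out : String) : Decidable (Spec_escape_and_convert_inline_py raw out) := by unfold Spec_escape_and_convert_inline_py; infer_instance

-- ===== CLAIM (what is proved, stated in full; the proofs are below) =====
def Claim_equal_escape_and_convert_inline_py : Prop := ∀ (raw : String), Dom_escape_and_convert_inline_py raw → Spec_escape_and_convert_inline_py raw (escape_and_convert_inline_py raw)

-- ===== LEMMAS AND PROOFS =====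

theorem pvSplitStars_none_no_prefix : ∀ (t : List Char), pvSplitStars t = none →
    ∀ j, ¬ (['*','*'] <+: t.drop j) := by
  intro t
  induction t with
  | nil => intro _ j hpre; have := hpre.length_le; simp at this
  | cons a t ih =>
    intro h j hpre
    match t with
    | [] =>
      have := hpre.length_le
      rcases j with _ | j <;> simp at this
    | b :: t' =>
      rw [pvSplitStars] at h
      split at h
      · exact absurd h (by simp)
      · rename_i hab
        have hn : pvSplitStars (b :: t') = none := by
          rcases hsp : pvSplitStars (b :: t') with _ | pr
          · rfl
          · rw [hsp] at h; simp at h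
        rcases j with _ | j
        · rw [List.drop_zero] at hpre
          rcases hpre with ⟨s, hs⟩
          simp at hs
          exact hab ⟨hs.1.symm, hs.2.1.symm⟩
        · exact ih hn j (by simpa using hpre)

theorem pvSplitStars_some_no_prefix : ∀ (t p r : List Char), pvSplitStars t = some (p, r) →
    ∀ j, j < p.length → ¬ (['*','*'] <+: t.drop j) := by
  intro t
  induction t with
  | nil => intro p r h; simp [pvSplitStars] at h
  | cons a t ih =>
    intro p r h j hj hpre
    match t with
    | [] => simp [pvSplitStars] at h
    | b :: t' =>
      rw [pvSplitStars] at h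
      split at h
      · obtain ⟨rfl, rfl⟩ : ([] : List Char) = p ∧ t' = r := by simpa using h
        simp at hj
      · rename_i hab
        simp only [Option.map_eq_some_iff] at h
        obtain ⟨⟨p', r'⟩, hp', heq⟩ := h
        obtain ⟨rfl, rfl⟩ : a :: p' = p ∧ r' = r := by simpa using heq
        rcases j with _ | j
        · rw [List.drop_zero] at hpre
          rcases hpre with ⟨s, hs⟩
          simp at hs
          exact hab ⟨hs.1.symm, hs.2.1.symm⟩
        · exact ih p' r' hp' j (by simpa using hj) (by simpa using hpre)

theorem pvSplitTick_none_no_prefix : ∀ (t : List Char), pvSplitTick t = none →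
    ∀ j, ¬ (['`'] <+: t.drop j) := by
  intro t
  induction t with
  | nil => intro _ j hpre; have := hpre.length_le; simp at this
  | cons c t ih =>
    intro h j hpre
    rw [pvSplitTick] at h
    split at h
    · exact absurd h (by simp)
    · rename_i hc
      have hn : pvSplitTick t = none := by
        rcases hsp : pvSplitTick t with _ | pr
        · rfl
        · rw [hsp] at h; simp at h
      rcases j with _ | j
      · rw [List.drop_zero] at hpre
        rcases hpre with ⟨s, hs⟩
        simp at hs
        exact hc hs.1.symm
      · exact ih hn j (by simpa using hpre)

theorem pvSplitTick_some_no_prefix : ∀ (t p r : List Char), pvSplitTick t = some (p, r) →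
    ∀ j, j < p.length → ¬ (['`'] <+: t.drop j) := by
  intro t
  induction t with
  | nil => intro p r h; simp [pvSplitTick] at h
  | cons c t ih =>
    intro p r h j hj hpre
    rw [pvSplitTick] at h
    split at h
    · obtain ⟨rfl, rfl⟩ : ([] : List Char) = p ∧ t = r := by simpa using h
      simp at hj
    · rename_i hc
      simp only [Option.map_eq_some_iff] at h
      obtain ⟨⟨p', r'⟩, hp', heq⟩ := h
      obtain ⟨rfl, rfl⟩ : c :: p' = p ∧ r' = r := by simpa using heq
      rcases j with _ | j
      · rw [List.drop_zero] at hpre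
        rcases hpre with ⟨s, hs⟩
        simp at hs
        exact hc hs.1.symm
      · exact ih p' r' hp' j (by simpa using hj) (by simpa using hpre)

theorem find_neg_of_no_prefix (t sub : List Char) (h : ∀ j, ¬ (sub <+: t.drop j)) :
    PySem.Chars.find t sub = -1 := by
  rw [PySem.Chars.find_eq_neg_one_iff]
  intro hinf
  have := (PySem.Chars.exists_prefix_drop_iff_isIn sub t).mpr ((PySem.Chars.isIn_iff_infix sub t).mpr hinf)
  obtain ⟨j, hj⟩ := this
  exact h j hj

theorem find_eq_of_first (t sub : List Char) (n : Nat) (hpre : sub <+: t.drop n)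
    (hmin : ∀ j, j < n → ¬ (sub <+: t.drop j)) :
    PySem.Chars.find t sub = (n : Int) := by
  have hnn : 0 ≤ PySem.Chars.find t sub := by
    rw [PySem.Chars.find_nonneg_iff]
    exact (PySem.Chars.isIn_iff_infix sub t).mp
      ((PySem.Chars.exists_prefix_drop_iff_isIn sub t).mp ⟨n, hpre⟩)
  obtain ⟨h1, h2⟩ := PySem.Chars.find_spec hnn
  have : (PySem.Chars.find t sub).toNat = n := by
    rcases Nat.lt_trichotomy (PySem.Chars.find t sub).toNat n with hlt | heq | hgt
    · exact absurd h1 (hmin _ hlt)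
    · exact heq
    · exact absurd hpre (h2 n hgt)
  omega

theorem find_of_splitStars_some (t p r : List Char) (h : pvSplitStars t = some (p, r)) :
    PySem.Chars.find t ['*','*'] = (p.length : Int) := by
  have ht := pvSplitStars_some_eq _ _ _ h
  apply find_eq_of_first
  · rw [ht, List.drop_left]
    exact ⟨r, rfl⟩
  · exact pvSplitStars_some_no_prefix t p r h

theorem find_of_splitTick_some (t p r : List Char) (h : pvSplitTick t = some (p, r)) :
    PySem.Chars.find t ['`'] = (p.length : Int) := by
  have ht := pvSplitTick_some_eq _ _ _ h
  apply find_eq_of_first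
  · rw [ht, List.drop_left]
    exact ⟨r, rfl⟩
  · exact pvSplitTick_some_no_prefix t p r h

theorem escTg_eq_aux : ∀ (n : Nat) (s : List Char) (i : Nat), s.length - i ≤ n →
    escTgA s i = escTgB (s.drop i) := by
  intro n
  induction n with
  | zero =>
    intro s i hn
    rw [escTgA, List.drop_eq_nil_of_le (by omega)]
    simp [escTgB]; omega
  | succ n ih =>
    intro s i hn
    by_cases h : i < s.length
    · have hd : s.drop i = s[i] :: s.drop (i+1) := (List.getElem_cons_drop h).symm
      rw [escTgA, dif_pos h]
      by_cases hp : s[i] = '\\' ∧ i + 1 < s.length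
      · rw [dif_pos hp]
        have hd2 : s.drop (i+1) = s[i+1]'hp.2 :: s.drop (i+2) := (List.getElem_cons_drop hp.2).symm
        rw [hd, hd2, escTgB, if_pos hp.1]
        simp [ih s (i+2) (by omega), hp.1]
      · rw [dif_neg hp]
        rcases ht : s.drop (i+1) with _ | ⟨d, t'⟩
        · rw [ih s (i+1) (by omega), ht, hd, ht]
          by_cases hcc : s[i] ∈ pvTgSpecial <;>
            simp [escTgB, show pvTgSpecialB = pvTgSpecial from rfl, hcc]
        · have hlt : i + 1 < s.length := by
            have := congrArg List.length ht
            simp at this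
            omega
          have hne : ¬ s[i] = '\\' := fun hc => hp ⟨hc, hlt⟩
          rw [hd, ht, escTgB, if_neg hne, ← ht, ih s (i+1) (by omega), ht]
          by_cases hcc : s[i] ∈ pvTgSpecial <;>
            simp [show pvTgSpecialB = pvTgSpecial from rfl, hcc]
    · rw [escTgA, List.drop_eq_nil_of_le (by omega)]
      simp [escTgB]; omega

theorem escTg_eq (s : List Char) : escTgA s 0 = escTgB s := by
  have := escTg_eq_aux s.length s 0 (by omega)
  simpa using this

theorem pvGo_eq : ∀ (fuel : Nat) (cs : List Char) (i : Nat), cs.length - i ≤ fuel →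
    (pvGoA cs fuel i).flatten = pvGoB (cs.drop i) := by
  intro fuel
  induction fuel with
  | zero =>
    intro cs i hf
    rw [List.drop_eq_nil_of_le (by omega)]
    simp [pvGoA, pvGoB]
  | succ fuel ih =>
    intro cs i hf
    by_cases h : i < cs.length
    case neg =>
      rw [List.drop_eq_nil_of_le (by omega), pvGoA]
      simp [h, pvGoB]
    case pos =>
    have hd : cs.drop i = cs[i] :: cs.drop (i+1) := (List.getElem_cons_drop h).symm
    have hslice2 : PySem.List.slice cs (some (i:Int)) (some ((i:Int)+2)) = (cs.drop i).take 2 := by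
      rw [show ((i:Int)+2) = ((i:Int) + ((2:Nat):Int)) by norm_num]
      exact PySem.List.slice_natCast_add cs i 2
    rw [pvGoA, dif_pos h]
    by_cases hstar : cs[i] = '*' ∧ (cs.drop (i+1)).head? = some '*'
    · -- a '**' opener at position i
      rcases ht : cs.drop (i+1) with _ | ⟨b, t₂⟩
      · rw [ht] at hstar; simp at hstar
      · have hb' : b = '*' := by rw [ht] at hstar; simpa using hstar.2
        subst hb'
        have hlen2 : i + 2 ≤ cs.length := by
          have := congrArg List.length ht
          simp at this
          omega
        have hdrop2 : cs.drop (i+2) = t₂ := by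
          rw [show i+2 = i+1+1 from rfl, ← List.drop_drop (i := 1) (j := i+1), ht]
          rfl
        have hsl : PySem.List.slice cs (some (i:Int)) (some ((i:Int)+2)) = ['*','*'] := by
          rw [hslice2, hd, ht, hstar.1]
          rfl
        have hff : PySem.Chars.findFrom cs ['*','*'] ((i:Int)+2) =
            if PySem.Chars.find t₂ ['*','*'] = -1 then -1
            else ((i+2:Nat):Int) + PySem.Chars.find t₂ ['*','*'] := by
          rw [show ((i:Int)+2) = (((i+2:Nat)):Int) by push_cast; ring,
              PySem.Chars.findFrom_natCast cs _ (i+2) hlen2, hdrop2]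
        rcases hss : pvSplitStars t₂ with _ | ⟨p, r⟩
        · -- no closing '**': the single '*' is consumed as a plain char
          have hfneg : PySem.Chars.find t₂ ['*','*'] = -1 :=
            find_neg_of_no_prefix _ _ (pvSplitStars_none_no_prefix _ hss)
          rw [dif_neg (by rw [hff, if_pos hfneg]; simp)]
          rw [dif_neg (by rw [hstar.1]; simp)]
          rw [dif_neg (by rw [hstar.1]; simp)]
          rw [hd, ht, hstar.1]
          have hrec := ih cs (i+1) (by omega)
          rw [ht] at hrec
          simp [pvGoB, pvTok, pvPlain, hss, hrec,
                (by decide : ¬ ('*' ∈ pvTgSpecial)), (by decide : ¬ ('*' ∈ pvTgSpecialB))]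
        · -- closing '**' found
          have hfpos := find_of_splitStars_some _ _ _ hss
          have hteq := pvSplitStars_some_eq _ _ _ hss
          have hffv : PySem.Chars.findFrom cs ['*','*'] ((i:Int)+2) = ((i+2+p.length:Nat):Int) := by
            rw [hff, hfpos, if_neg (by omega)]
            push_cast
            ring
          rw [dif_pos ⟨hsl, by rw [hffv]; omega⟩]
          have hslin : PySem.List.slice cs (some ((i:Int)+2)) (some (PySem.Chars.findFrom cs ['*','*'] ((i:Int)+2))) = p := by
            rw [hffv, show ((i:Int)+2) = (((i+2:Nat)):Int) by push_cast; ring,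
                PySem.List.slice_natCast, hdrop2, show i+2+p.length-(i+2) = p.length by omega,
                hteq, List.take_left]
          have hidx : ((PySem.Chars.findFrom cs ['*','*'] ((i:Int)+2)) + 2).toNat = i+2+p.length+2 := by
            rw [hffv]; omega
          have hdropr : cs.drop (i+2+p.length+2) = r := by
            rw [show i+2+p.length+2 = (i+2) + (p.length+2) by ring, ← List.drop_drop, hdrop2, hteq,
                show p.length + 2 = p.length + 2 by rfl]
            simp [List.drop_append]
          have hrec := ih cs (i+2+p.length+2) (by omega)
          rw [hdropr] at hrec
          rw [hslin, hidx, hd, ht, hstar.1]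
          simp [pvGoB, pvTok, hss, hrec, escTg_eq]
    · -- no bold token here
      have hslne : PySem.List.slice cs (some (i:Int)) (some ((i:Int)+2)) ≠ ['*','*'] := by
        rw [hslice2, hd]
        intro hsl
        apply hstar
        rcases ht : cs.drop (i+1) with _ | ⟨d, t'⟩ <;> rw [ht] at hsl <;> simp at hsl
        exact ⟨hsl.1, by simp [hsl.2]⟩
      rw [dif_neg (fun hbb => hslne hbb.1)]
      by_cases htk : cs[i] = '`'
      · -- code-span opener
        have hff : PySem.Chars.findFrom cs ['`'] ((i:Int)+1) =
            if PySem.Chars.find (cs.drop (i+1)) ['`'] = -1 then -1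
            else ((i+1:Nat):Int) + PySem.Chars.find (cs.drop (i+1)) ['`'] := by
          rw [show ((i:Int)+1) = (((i+1:Nat)):Int) by push_cast; ring,
              PySem.Chars.findFrom_natCast cs _ (i+1) (by omega)]
        rcases htt : pvSplitTick (cs.drop (i+1)) with _ | ⟨p, r⟩
        · -- no closing backtick: '`' is escaped as a plain special char
          have hfneg : PySem.Chars.find (cs.drop (i+1)) ['`'] = -1 :=
            find_neg_of_no_prefix _ _ (pvSplitTick_none_no_prefix _ htt)
          rw [dif_neg (by rw [hff, if_pos hfneg]; simp)]
          rw [dif_neg (by rw [htk]; simp)]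
          rw [hd, htk]
          have hrec := ih cs (i+1) (by omega)
          simp [pvGoB, pvTok, pvPlain, htt, hrec,
                (by decide : ('`' ∈ pvTgSpecial)), (by decide : ('`' ∈ pvTgSpecialB))]
        · -- closing backtick found
          have hfpos := find_of_splitTick_some _ _ _ htt
          have hteq := pvSplitTick_some_eq _ _ _ htt
          have hffv : PySem.Chars.findFrom cs ['`'] ((i:Int)+1) = ((i+1+p.length:Nat):Int) := by
            rw [hff, hfpos, if_neg (by omega)]
            push_cast
            ring
          rw [dif_pos ⟨htk, by rw [hffv]; omega⟩]
          have hslin : PySem.List.slice cs (some ((i:Int)+1)) (some (PySem.Chars.findFrom cs ['`'] ((i:Int)+1))) = p := by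
            rw [hffv, show ((i:Int)+1) = (((i+1:Nat)):Int) by push_cast; ring,
                PySem.List.slice_natCast, show i+1+p.length-(i+1) = p.length by omega,
                hteq, List.take_left]
          have hidx : ((PySem.Chars.findFrom cs ['`'] ((i:Int)+1)) + 1).toNat = i+1+p.length+1 := by
            rw [hffv]; omega
          have hdropr : cs.drop (i+1+p.length+1) = r := by
            rw [show i+1+p.length+1 = (i+1) + (p.length+1) by ring, ← List.drop_drop, hteq]
            simp [List.drop_append]
          have hrec := ih cs (i+1+p.length+1) (by omega)
          rw [hdropr] at hrec
          rw [hslin, hidx, hd, htk]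
          have hne : ¬ ('`' = '*' ∧ (cs.drop (i+1)).head? = some '*') := by simp
          simp [pvGoB, pvTok, htt, hrec]
      · by_cases hbsc : cs[i] = '\\'
        · -- backslash: emit the pair raw, or a lone trailing backslash
          rw [dif_neg (fun hcc => htk hcc.1)]
          rcases ht : cs.drop (i+1) with _ | ⟨d, t'⟩
          · have hge : cs.length ≤ i + 1 := by
              have := congrArg List.length ht
              simp at this
              omega
            rw [dif_neg (fun hcc => by omega)]
            rw [hd, ht, hbsc]
            have hrec := ih cs (i+1) (by omega)
            rw [ht] at hrec
            simp [pvGoB, pvTok, pvPlain, hrec,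
                  (by decide : ¬ ('\\' ∈ pvTgSpecial)), (by decide : ¬ ('\\' ∈ pvTgSpecialB))]
          · have hlt : i + 1 < cs.length := by
              have := congrArg List.length ht
              simp at this
              omega
            rw [dif_pos ⟨hbsc, hlt⟩]
            have hd2 : cs.drop (i+1) = cs[i+1]'hlt :: cs.drop (i+2) := (List.getElem_cons_drop hlt).symm
            have hdefs : cs[i+1]'hlt = d ∧ cs.drop (i+2) = t' := by
              have h2 := hd2.symm.trans ht
              rw [List.cons.injEq] at h2
              exact h2
            have hrec := ih cs (i+2) (by omega)
            rw [hdefs.2] at hrec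
            rw [hd, ht]
            simp [pvGoB, pvTok, hrec, hbsc, hdefs.1]
        · -- plain character
          rw [dif_neg (fun hcc => htk hcc.1), dif_neg (fun hcc => hbsc hcc.1)]
          have hrec := ih cs (i+1) (by omega)
          have hB : pvGoB (cs.drop i) =
              (if pvTgSpecialB.contains cs[i] then ['\\', cs[i]] else [cs[i]]) ++ pvGoB (cs.drop (i+1)) := by
            rw [hd]
            simp only [pvGoB]
            unfold pvTok
            rw [if_neg hstar, if_neg htk, if_neg hbsc]
            simp only [pvPlain]
          rw [hB]
          cases hcc : pvTgSpecialB.contains cs[i] <;>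
            simp only [show pvTgSpecial = pvTgSpecialB from rfl, hcc] <;>
            simp [hrec]

-- ===== VERDICT (by name: the statement is the Claim_ definition above) =====
theorem escape_and_convert_inline_py_spec : Claim_equal_escape_and_convert_inline_py := by
  intro raw _
  unfold Spec_escape_and_convert_inline_py escape_and_convert_inline_py escape_and_convert_inline_py_alt
  have := pvGo_eq raw.toList.length raw.toList 0 (by omega)
  simp only [List.drop_zero] at this
  rw [this]
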